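-- pv_equiv track=rewrite | github.com/Larissa-11/INNSE | codes/add_address.py | correct_indexes
-- ===== SOURCE A (Python) =====
-- def correct_indexes(indexes):
--     corrected_indexes = []
--     used_indexes = set()
--     for i in range(len(indexes)):
--         if indexes[i] in used_indexes or indexes[i] >= len(indexes):
--             corrected_indexes.append(None)
--         else:
--             corrected_indexes.append(indexes[i])
--             used_indexes.add(indexes[i])
--     next_index = 0
--     for i in range(len(corrected_indexes)):
--         if corrected_indexes[i] is None:
--             while next_index in used_indexes:
--                 next_index += 1
--             corrected_indexes[i] = next_index
--             used_indexes.add(next_index)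
--             next_index += 1
--     return corrected_indexes
-- ===== SOURCE B (Python) =====
-- def correct_indexes(indexes):
--     n = len(indexes)
--     kept = []                       # (position, value) of first valid occurrences, positions increasing
--     seen = set()
--     for p, v in enumerate(indexes):
--         if v < n and v not in seen:
--             seen.add(v)
--             kept.append((p, v))
--     taken = {p for p, _ in kept}
--     gaps = list(zip((p for p in range(n) if p not in taken),
--                     (k for k in range(n) if k not in seen)))
--     # merge the two position-sorted streams into the result
--     out = []
--     i = j = 0
--     while i < len(kept) or j < len(gaps):
--         if j == len(gaps) or (i < len(kept) and kept[i][0] < gaps[j][0]):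
--             out.append(kept[i][1]); i += 1
--         else:
--             out.append(gaps[j][1]); j += 1
--     return out
-- ===== Notes on version B (the rewrite author's own statement) =====
-- stated objective: alternative
-- what changed: A builds a list with None placeholders and then mutates it in a second pass, advancing a next_index cursor by a 'while next_index in used' scan to fill each hole; B never materialises placeholders or a cursor: it collects the surviving (position, value) pairs, pairs the free positions with the free values by a single zip of two filtered ranges, and produces the output by a two-pointer merge of the two position-sorted streams.
import Mathlib
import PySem

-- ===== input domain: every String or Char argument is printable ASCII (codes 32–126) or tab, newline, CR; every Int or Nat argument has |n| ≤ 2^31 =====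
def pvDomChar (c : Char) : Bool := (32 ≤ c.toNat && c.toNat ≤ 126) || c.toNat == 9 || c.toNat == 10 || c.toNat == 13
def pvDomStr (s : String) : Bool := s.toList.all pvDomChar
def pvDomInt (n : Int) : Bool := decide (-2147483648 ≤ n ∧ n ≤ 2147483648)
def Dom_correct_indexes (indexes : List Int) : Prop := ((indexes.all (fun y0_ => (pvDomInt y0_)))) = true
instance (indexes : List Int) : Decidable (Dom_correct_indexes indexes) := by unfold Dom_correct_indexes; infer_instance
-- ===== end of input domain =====

-- B drops A's None-placeholder list and while-cursor second pass: it collects the surviving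
-- (position, value) pairs, pairs the free positions with the free values by a zip, and merges
-- the two position-sorted streams two-pointer style (objective: alternative, same linear shape).

-- ===== PORT A =====
-- 'while next_index in used_indexes: next_index += 1' — fuel |used|+1 is exact: among the
-- |used|+1 distinct candidates k, k+1, …, k+|used| at least one is outside used, so the Python
-- loop stops within the fuel and this returns the first candidate not in used, as Python does.
def pvFindFree (used : PySem.Set Int) (k : Int) : (fuel : Nat) → Int
  | 0 => k
  | fuel + 1 => if used.contains k then pvFindFree used (k + 1) fuel else k

-- second loop of A: scan corrected_indexes, replacing each None in place
def pvFillA (cs : List (Option Int)) (used : PySem.Set Int) (next : Int) : List Int :=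
  match cs with
  | [] => []
  | some v :: t => v :: pvFillA t used next
  | none :: t =>
      let k := pvFindFree used next (used.length + 1)
      k :: pvFillA t (used.add k) (k + 1)

def correct_indexes (indexes : List Int) : List Int :=
  let n : Int := indexes.length
  let p := indexes.foldl
    (fun (st : List (Option Int) × PySem.Set Int) v =>
      if st.2.contains v || decide (n ≤ v) then (st.1 ++ [(none : Option Int)], st.2)
      else (st.1 ++ [some v], st.2.add v))
    ([], PySem.Set.empty)
  pvFillA p.1 p.2 0

-- ===== PORT B =====
-- the while loop over the i/j cursors, as the obvious structural recursion on the two streams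
def pvMerge : List (Int × Int) → List (Int × Int) → List Int
  | [], [] => []
  | (_, v) :: ks, [] => v :: pvMerge ks []
  | [], (_, f) :: gs => f :: pvMerge [] gs
  | (p, v) :: ks, (q, f) :: gs =>
      if p < q then v :: pvMerge ks ((q, f) :: gs)
      else f :: pvMerge ((p, v) :: ks) gs
  termination_by ks gs => ks.length + gs.length

def correct_indexes_alt (indexes : List Int) : List Int :=
  let n : Int := indexes.length
  let st := (PySem.List.enumerate indexes 0).foldl
    (fun (st : List (Int × Int) × PySem.Set Int) pv =>
      if decide (pv.2 < n) && !(st.2.contains pv.2) then (st.1 ++ [(pv.1, pv.2)], st.2.add pv.2)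
      else st) ([], PySem.Set.empty)
  let kept := st.1
  let seen := st.2
  let taken := PySem.Set.ofList (kept.map Prod.fst)
  let gaps := List.zip ((PySem.List.pyRange 0 n 1).filter (fun p => !(taken.contains p)))
                       ((PySem.List.pyRange 0 n 1).filter (fun k => !(seen.contains k)))
  pvMerge kept gaps

-- ===== PRECONDITION & SPEC =====
def Spec_correct_indexes (indexes : List Int) (out : List Int) : Prop := out = correct_indexes_alt indexes
instance (indexes : List Int) (out : List Int) : Decidable (Spec_correct_indexes indexes out) := by unfold Spec_correct_indexes; infer_instance

-- ===== CLAIM (what is proved, stated in full; the proofs are below) =====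
def Claim_equal_correct_indexes : Prop := ∀ (indexes : List Int), Dom_correct_indexes indexes → Spec_correct_indexes indexes (correct_indexes indexes)

-- ===== LEMMAS AND PROOFS =====

-- ghost first pass: the Option-marked list and the kept set that both first passes compute
def pvMark (n : Int) : List Int → PySem.Set Int → List (Option Int) × PySem.Set Int
  | [], s => ([], s)
  | v :: t, s =>
      if v < n ∧ v ∉ s then
        (some v :: (pvMark n t (s.add v)).1, (pvMark n t (s.add v)).2)
      else
        (none :: (pvMark n t s).1, (pvMark n t s).2)

-- ghost second pass of A: fill the None slots from the free list
def pvFillB : List (Option Int) → List Int → List Int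
  | [], _ => []
  | some v :: t, free => v :: pvFillB t free
  | none :: t, f :: fs => f :: pvFillB t fs
  | none :: _, [] => []

-- ghost views of the marked list: surviving (position, value) pairs, and the None positions
def pvKept : Int → List (Option Int) → List (Int × Int)
  | _, [] => []
  | off, some v :: t => (off, v) :: pvKept (off + 1) t
  | off, none :: t => pvKept (off + 1) t

def pvNones : Int → List (Option Int) → List Int
  | _, [] => []
  | off, some _ :: t => pvNones (off + 1) t
  | off, none :: t => off :: pvNones (off + 1) t

lemma testB_iff (n : Int) (s : PySem.Set Int) (v : Int) :
    (decide (v < n) && !(s.contains v)) = true ↔ (v < n ∧ v ∉ s) := by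
  cases hb : s.contains v
  · simp at hb
    simp [hb]
  · simp [(PySem.Set.contains_iff s v).mp hb]

lemma testA_false (n : Int) (s : PySem.Set Int) (v : Int) (h : v < n ∧ v ∉ s) :
    (s.contains v || decide (n ≤ v)) = false := by
  have h1 : s.contains v = false := by
    cases hb : s.contains v
    · rfl
    · exact absurd ((PySem.Set.contains_iff s v).mp hb) h.2
  have hvn := h.1
  rw [h1]
  simp only [Bool.false_or, decide_eq_false_iff_not]
  omega

lemma testA_true (n : Int) (s : PySem.Set Int) (v : Int) (h : ¬ (v < n ∧ v ∉ s)) :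
    (s.contains v || decide (n ≤ v)) = true := by
  by_cases hb : s.contains v = true
  · rw [hb]; simp
  · have hv : v ∉ s := fun hm => hb ((PySem.Set.contains_iff s v).mpr hm)
    have hnlt : ¬ v < n := fun hlt => h ⟨hlt, hv⟩
    have h1 : s.contains v = false := by
      cases hcb : s.contains v
      · rfl
      · exact absurd hcb hb
    rw [h1]
    simp only [Bool.false_or, decide_eq_true_eq]
    omega

lemma foldA_eq_mark (n : Int) : ∀ (xs : List Int) (s : PySem.Set Int) (acc : List (Option Int)),
    xs.foldl
      (fun (st : List (Option Int) × PySem.Set Int) v =>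
        if st.2.contains v || decide (n ≤ v) then (st.1 ++ [(none : Option Int)], st.2)
        else (st.1 ++ [some v], st.2.add v)) (acc, s)
    = (acc ++ (pvMark n xs s).1, (pvMark n xs s).2)
  | [], s, acc => by simp [pvMark]
  | v :: t, s, acc => by
    rw [List.foldl_cons]
    by_cases h : v < n ∧ v ∉ s
    · simp only [testA_false n s v h, Bool.false_eq_true, if_false]
      rw [foldA_eq_mark n t (s.add v) (acc ++ [some v])]
      simp only [pvMark, if_pos h, List.append_assoc, List.singleton_append]
    · simp only [testA_true n s v h, if_true]
      rw [foldA_eq_mark n t s (acc ++ [none])]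
      simp only [pvMark, if_neg h, List.append_assoc, List.singleton_append]

lemma mark_nodup (n : Int) : ∀ (xs : List Int) (s : PySem.Set Int),
    s.Nodup → (pvMark n xs s).2.Nodup
  | [], _, h => h
  | v :: t, s, h => by
    by_cases hc : v < n ∧ v ∉ s
    · simp only [pvMark, if_pos hc]
      exact mark_nodup n t (s.add v) (PySem.Set.nodup_add s v h)
    · simp only [pvMark, if_neg hc]
      exact mark_nodup n t s h

lemma mark_count (n : Int) : ∀ (xs : List Int) (s : PySem.Set Int),
    (pvMark n xs s).1.countP (·.isNone) + (pvMark n xs s).2.length = xs.length + s.length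
  | [], s => by simp [pvMark]
  | v :: t, s => by
    by_cases hc : v < n ∧ v ∉ s
    · simp only [pvMark, if_pos hc, List.countP_cons, Option.isNone_some]
      have h1 := mark_count n t (s.add v)
      have h2 : (s.add v).length = s.length + 1 := by
        rw [PySem.Set.add_of_not_mem hc.2]; simp
      simp only [h2] at h1
      simp
      omega
    · simp only [pvMark, if_neg hc, List.countP_cons, Option.isNone_none]
      have h1 := mark_count n t s
      simp
      omega

lemma mark_len (n : Int) : ∀ (xs : List Int) (s : PySem.Set Int),
    (pvMark n xs s).1.length = xs.length
  | [], _ => rfl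
  | v :: t, s => by
    by_cases hc : v < n ∧ v ∉ s
    · simp only [pvMark, if_pos hc, List.length_cons, mark_len n t (s.add v)]
    · simp only [pvMark, if_neg hc, List.length_cons, mark_len n t s]

lemma findFree_eq (used : PySem.Set Int) : ∀ (fuel : Nat) (next h : Int),
    next ≤ h → h ∉ used → (∀ i, next ≤ i → i < h → i ∈ used) →
    (h - next).toNat < fuel → pvFindFree used next fuel = h
  | 0, next, h, _, _, _, hf => by omega
  | fuel + 1, next, h, hle, hh, hall, hf => by
    unfold pvFindFree
    by_cases hc : used.contains next = true
    · have hne : next ≠ h := by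
        intro e; exact hh (e ▸ (PySem.Set.contains_iff used next).mp hc)
      rw [if_pos hc]
      exact findFree_eq used fuel (next + 1) h (by omega) hh
        (fun i h1 h2 => hall i (by omega) h2) (by omega)
    · rw [if_neg hc]
      by_contra hne
      have hlt : next < h := lt_of_le_of_ne hle hne
      exact hc ((PySem.Set.contains_iff used next).mpr (hall next le_rfl hlt))

-- the head of the remaining free-slot list is the smallest free index ≥ next, and consuming it
-- is the same as filtering with the enlarged used set and the advanced cursor
lemma filter_step (n next : Int) (used : PySem.Set Int) (h : Int) (rest : List Int)
    (hnext : 0 ≤ next)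
    (heq : (PySem.List.pyRange 0 n 1).filter (fun i => decide (next ≤ i) && !(used.contains i)) = h :: rest) :
    (next ≤ h ∧ h ∉ used ∧ 0 ≤ h ∧ h < n) ∧
    (∀ i, next ≤ i → i < h → i ∈ used) ∧
    rest = (PySem.List.pyRange 0 n 1).filter (fun i => decide (h + 1 ≤ i) && !((used.add h).contains i)) := by
  have hpair : ((PySem.List.pyRange 0 n 1).filter (fun i => decide (next ≤ i) && !(used.contains i))).Pairwise (· < ·) :=
    (PySem.List.pairwise_lt_pyRange_one 0 n).filter _
  rw [heq] at hpair
  have hpair' := List.pairwise_cons.mp hpair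
  have hmem : h ∈ (PySem.List.pyRange 0 n 1).filter (fun i => decide (next ≤ i) && !(used.contains i)) := by
    rw [heq]; exact List.mem_cons_self
  obtain ⟨hrange, hp⟩ := List.mem_filter.mp hmem
  obtain ⟨hh0, hhn⟩ := PySem.List.mem_pyRange_one.mp hrange
  simp only [Bool.and_eq_true, decide_eq_true_eq, Bool.not_eq_true'] at hp
  have hleh : next ≤ h := hp.1
  have hfree : h ∉ used := fun hm => by
    rw [(PySem.Set.contains_iff used h).mpr hm] at hp
    exact Bool.true_eq_false.mp hp.2
  have hall : ∀ i, next ≤ i → i < h → i ∈ used := by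
    intro i hi1 hi2
    by_contra hiu
    have hci : used.contains i = false := by
      cases hc : used.contains i
      · rfl
      · exact absurd ((PySem.Set.contains_iff used i).mp hc) hiu
    have hmi : i ∈ (PySem.List.pyRange 0 n 1).filter (fun i => decide (next ≤ i) && !(used.contains i)) :=
      List.mem_filter.mpr ⟨PySem.List.mem_pyRange_one.mpr ⟨by omega, by omega⟩, by rw [hci]; simp [hi1]⟩
    rw [heq] at hmi
    rcases List.mem_cons.mp hmi with rfl | hmem2
    · omega
    · exact absurd hi2 (by have := hpair'.1 i hmem2; omega)
  refine ⟨⟨hleh, hfree, hh0, hhn⟩, hall, ?_⟩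
  have hcadd : ∀ i, i ≠ h → (used.add h).contains i = used.contains i := by
    intro i hne
    cases hc : used.contains i
    · have hni : i ∉ used := fun hm => by
        rw [(PySem.Set.contains_iff used i).mpr hm] at hc
        exact Bool.true_eq_false.mp hc
      cases hc2 : (used.add h).contains i
      · rfl
      · rcases (PySem.Set.mem_add used h i).mp ((PySem.Set.contains_iff _ i).mp hc2) with hm | rfl
        · exact absurd hm hni
        · exact absurd rfl hne
    · exact (PySem.Set.contains_iff _ i).mpr
        ((PySem.Set.mem_add used h i).mpr (Or.inl ((PySem.Set.contains_iff used i).mp hc)))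
  have hsplit1 : PySem.List.pyRange 0 n 1 = PySem.List.pyRange 0 h 1 ++ PySem.List.pyRange h n 1 :=
    PySem.List.pyRange_one_append 0 h n hh0 (by omega)
  have hcons : PySem.List.pyRange h n 1 = h :: PySem.List.pyRange (h + 1) n 1 :=
    PySem.List.pyRange_one_cons hhn
  have hf1 : (PySem.List.pyRange 0 h 1).filter (fun i => decide (next ≤ i) && !(used.contains i)) = [] := by
    refine List.filter_eq_nil_iff.mpr (fun i hi => ?_)
    obtain ⟨hi0, hih⟩ := PySem.List.mem_pyRange_one.mp hi
    by_cases hni : next ≤ i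
    · have hci : used.contains i = true := (PySem.Set.contains_iff used i).mpr (hall i hni hih)
      rw [hci]
      simp
    · simp [hni]
  have hph : (decide (next ≤ h) && !(used.contains h)) = true := by
    rw [hp.2]
    simp [hleh]
  have hrest1 : rest = (PySem.List.pyRange (h + 1) n 1).filter (fun i => decide (next ≤ i) && !(used.contains i)) := by
    have : (PySem.List.pyRange 0 n 1).filter (fun i => decide (next ≤ i) && !(used.contains i))
        = h :: (PySem.List.pyRange (h + 1) n 1).filter (fun i => decide (next ≤ i) && !(used.contains i)) := by
      rw [hsplit1, List.filter_append, hf1, List.nil_append, hcons,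
        List.filter_cons, if_pos hph]
    rw [heq] at this
    exact (List.cons.injEq _ _ _ _).mp this |>.2
  have hf2 : (PySem.List.pyRange 0 (h + 1) 1).filter (fun i => decide (h + 1 ≤ i) && !((used.add h).contains i)) = [] := by
    refine List.filter_eq_nil_iff.mpr (fun i hi => ?_)
    obtain ⟨hi0, hih⟩ := PySem.List.mem_pyRange_one.mp hi
    simp [show ¬ (h + 1 ≤ i) by omega]
  have hsplit2 : PySem.List.pyRange 0 n 1 = PySem.List.pyRange 0 (h + 1) 1 ++ PySem.List.pyRange (h + 1) n 1 :=
    PySem.List.pyRange_one_append 0 (h + 1) n (by omega) (by omega)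
  have hcongr : (PySem.List.pyRange (h + 1) n 1).filter (fun i => decide (h + 1 ≤ i) && !((used.add h).contains i))
      = (PySem.List.pyRange (h + 1) n 1).filter (fun i => decide (next ≤ i) && !(used.contains i)) := by
    refine List.filter_congr (fun i hi => ?_)
    obtain ⟨hi1, hi2⟩ := PySem.List.mem_pyRange_one.mp hi
    rw [hcadd i (by omega)]
    simp [show next ≤ i by omega, show h + 1 ≤ i by omega]
  rw [hrest1, hsplit2, List.filter_append, hf2, List.nil_append, hcongr]

lemma fill_eq (n : Int) : ∀ (cs : List (Option Int)) (used : PySem.Set Int) (next : Int),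
    0 ≤ next → used.Nodup →
    cs.countP (·.isNone) ≤ ((PySem.List.pyRange 0 n 1).filter (fun i => decide (next ≤ i) && !(used.contains i))).length →
    pvFillA cs used next = pvFillB cs ((PySem.List.pyRange 0 n 1).filter (fun i => decide (next ≤ i) && !(used.contains i)))
  | [], used, next, _, _, _ => by simp [pvFillA, pvFillB]
  | some v :: t, used, next, h0, hnd, hcnt => by
    simp only [pvFillA, pvFillB]
    rw [fill_eq n t used next h0 hnd (by simpa using hcnt)]
  | none :: t, used, next, h0, hnd, hcnt => by
    have hne : ((PySem.List.pyRange 0 n 1).filter (fun i => decide (next ≤ i) && !(used.contains i))) ≠ [] := by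
      intro hnil
      rw [hnil] at hcnt
      simp only [List.countP_cons, Option.isNone_none, List.length_nil, if_true] at hcnt
      omega
    obtain ⟨h, rest, heq⟩ := List.exists_cons_of_ne_nil hne
    obtain ⟨⟨hle, hfree, hh0, hhn⟩, hall, hrest⟩ := filter_step n next used h rest h0 heq
    have hfuel : (h - next).toNat < used.length + 1 := by
      have hsub : PySem.List.pyRange next h 1 ⊆ used := by
        intro i hi
        have := PySem.List.mem_pyRange_one.mp hi
        exact hall i this.1 this.2
      have hnd2 := PySem.List.nodup_pyRange_one next h
      have := (hnd2.subperm hsub).length_le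
      rw [PySem.List.length_pyRange_one] at this
      omega
    have hk : pvFindFree used next (used.length + 1) = h :=
      findFree_eq used (used.length + 1) next h hle hfree hall hfuel
    have hcnt' : t.countP (·.isNone) ≤ rest.length := by
      rw [heq] at hcnt
      simp only [List.countP_cons, Option.isNone_none, List.length_cons, if_true] at hcnt
      omega
    have hmain := fill_eq n t (used.add h) (h + 1) (by omega) (PySem.Set.nodup_add used h hnd)
      (by rw [← hrest]; exact hcnt')
    simp only [pvFillA, hk, heq, pvFillB]
    rw [hmain, ← hrest]

lemma final_count (n : Int) (xs : List Int) (hn : n = (xs.length : Int)) :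
    (pvMark n xs PySem.Set.empty).1.countP (·.isNone)
      ≤ ((PySem.List.pyRange 0 n 1).filter (fun i => decide (0 ≤ i) && !((pvMark n xs PySem.Set.empty).2.contains i))).length := by
  have hmc := mark_count n xs PySem.Set.empty
  have hsub : PySem.List.pyRange 0 n 1
      ⊆ ((PySem.List.pyRange 0 n 1).filter (fun i => decide (0 ≤ i) && !((pvMark n xs PySem.Set.empty).2.contains i)))
        ++ (pvMark n xs PySem.Set.empty).2 := by
    intro i hi
    obtain ⟨hi0, hin⟩ := PySem.List.mem_pyRange_one.mp hi
    by_cases hm : i ∈ (pvMark n xs PySem.Set.empty).2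
    · exact List.mem_append.mpr (Or.inr hm)
    · have hci : (pvMark n xs PySem.Set.empty).2.contains i = false := by
        cases hc : (pvMark n xs PySem.Set.empty).2.contains i
        · rfl
        · exact absurd ((PySem.Set.contains_iff _ i).mp hc) hm
      exact List.mem_append.mpr (Or.inl (List.mem_filter.mpr ⟨hi, by rw [hci]; simp [hi0]⟩))
  have hlen := ((PySem.List.nodup_pyRange_one 0 n).subperm hsub).length_le
  rw [PySem.List.length_pyRange_one, List.length_append] at hlen
  have h0 : (PySem.Set.empty : PySem.Set Int).length = 0 := rfl
  have hlnn : (n - 0).toNat = xs.length := by omega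
  omega

-- ===== B-side lemmas =====

lemma contains_ofList (L : List Int) (p : Int) :
    (PySem.Set.ofList L).contains p = decide (p ∈ L) := by
  by_cases h : p ∈ L
  · rw [(PySem.Set.contains_iff _ p).mpr ((PySem.Set.mem_ofList L p).mpr h)]
    simp [h]
  · have : (PySem.Set.ofList L).contains p = false := by
      cases hc : (PySem.Set.ofList L).contains p
      · rfl
      · exact absurd ((PySem.Set.mem_ofList L p).mp ((PySem.Set.contains_iff _ p).mp hc)) h
    rw [this]
    simp [h]

lemma foldKept_eq_mark (n : Int) : ∀ (xs : List Int) (off : Int) (s : PySem.Set Int) (acc : List (Int × Int)),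
    (PySem.List.enumerate xs off).foldl
      (fun (st : List (Int × Int) × PySem.Set Int) pv =>
        if decide (pv.2 < n) && !(st.2.contains pv.2) then (st.1 ++ [(pv.1, pv.2)], st.2.add pv.2)
        else st) (acc, s)
    = (acc ++ pvKept off (pvMark n xs s).1, (pvMark n xs s).2)
  | [], off, s, acc => by simp [PySem.List.enumerate_nil, pvMark, pvKept]
  | v :: t, off, s, acc => by
    rw [PySem.List.enumerate_cons, List.foldl_cons]
    by_cases h : v < n ∧ v ∉ s
    · simp only [testB_iff n s v |>.mpr h, if_true]
      rw [foldKept_eq_mark n t (off + 1) (s.add v) (acc ++ [(off, v)])]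
      simp only [pvMark, if_pos h, pvKept, List.append_assoc, List.singleton_append]
    · rw [if_neg (fun hb => h ((testB_iff n s v).mp hb))]
      rw [foldKept_eq_mark n t (off + 1) s acc]
      simp only [pvMark, if_neg h, pvKept]

lemma kept_fst_ge : ∀ (cs : List (Option Int)) (off : Int) (q : Int × Int),
    q ∈ pvKept off cs → off ≤ q.1
  | [], _, _, h => absurd h (List.not_mem_nil)
  | some v :: t, off, q, h => by
    rcases List.mem_cons.mp h with rfl | h2
    · exact le_rfl
    · have := kept_fst_ge t (off + 1) q h2; omega
  | none :: t, off, q, h => by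
    have := kept_fst_ge t (off + 1) q h; omega

lemma nones_ge : ∀ (cs : List (Option Int)) (off : Int) (p : Int),
    p ∈ pvNones off cs → off ≤ p
  | [], _, _, h => absurd h (List.not_mem_nil)
  | some v :: t, off, p, h => by
    have := nones_ge t (off + 1) p h; omega
  | none :: t, off, p, h => by
    rcases List.mem_cons.mp h with rfl | h2
    · exact le_rfl
    · have := nones_ge t (off + 1) p h2; omega

lemma nones_len : ∀ (cs : List (Option Int)) (off : Int),
    (pvNones off cs).length = cs.countP (·.isNone)
  | [], _ => rfl
  | some v :: t, off => by
    simp [pvNones, nones_len t (off + 1)]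
  | none :: t, off => by
    simp [pvNones, nones_len t (off + 1)]

-- the free positions, computed by filtering the whole range against the taken set,
-- are exactly the None positions of the marked list
lemma filter_taken : ∀ (cs : List (Option Int)) (off : Int),
    (PySem.List.pyRange off (off + (cs.length : Int)) 1).filter
      (fun p => !((PySem.Set.ofList ((pvKept off cs).map Prod.fst)).contains p)) = pvNones off cs
  | [], off => by
    rw [PySem.List.pyRange_one_eq_nil (by simp : off + (([] : List (Option Int)).length : Int) ≤ off)]
    simp [pvNones]
  | c :: t, off => by
    have hlt : off < off + ((c :: t).length : Int) := by simp
    rw [PySem.List.pyRange_one_cons hlt, List.filter_cons]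
    have harr : off + ((c :: t).length : Int) = (off + 1) + (t.length : Int) := by
      simp; omega
    cases c with
    | some v =>
      have hhead : (PySem.Set.ofList ((pvKept off (some v :: t)).map Prod.fst)).contains off = true := by
        rw [contains_ofList]
        simp [pvKept]
      rw [hhead]
      simp only [Bool.not_true, Bool.false_eq_true, if_false]
      have hcongr : (PySem.List.pyRange (off + 1) (off + ((some v :: t).length : Int)) 1).filter
            (fun p => !((PySem.Set.ofList ((pvKept off (some v :: t)).map Prod.fst)).contains p))
          = (PySem.List.pyRange (off + 1) (off + ((some v :: t).length : Int)) 1).filter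
            (fun p => !((PySem.Set.ofList ((pvKept (off + 1) t).map Prod.fst)).contains p)) := by
        refine List.filter_congr (fun p hp => ?_)
        obtain ⟨hp1, _⟩ := PySem.List.mem_pyRange_one.mp hp
        rw [contains_ofList, contains_ofList]
        simp only [pvKept, List.map_cons]
        have : p ≠ off := by omega
        simp [List.mem_cons, this]
      rw [hcongr, harr, filter_taken t (off + 1)]
      rfl
    | none =>
      have hhead : (PySem.Set.ofList ((pvKept off (none :: t)).map Prod.fst)).contains off = false := by
        rw [contains_ofList]
        simp only [pvKept, decide_eq_false_iff_not]
        intro hmem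
        obtain ⟨q, hq, hq2⟩ := List.mem_map.mp hmem
        have := kept_fst_ge t (off + 1) q hq
        omega
      rw [hhead]
      simp only [Bool.not_false, if_true]
      rw [harr]
      simp only [pvKept]
      rw [filter_taken t (off + 1)]
      rfl

-- the two-pointer merge of the surviving pairs with (None positions ⨯ free values)
-- is exactly A's fill of the marked list from the free values
lemma merge_eq_fill : ∀ (cs : List (Option Int)) (off : Int) (free : List Int),
    cs.countP (·.isNone) ≤ free.length →
    pvMerge (pvKept off cs) ((pvNones off cs).zip free) = pvFillB cs free
  | [], off, free, _ => by simp [pvKept, pvNones, pvMerge, pvFillB]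
  | some v :: t, off, free, hcnt => by
    have hcnt' : t.countP (·.isNone) ≤ free.length := by
      simp only [List.countP_cons, Option.isNone_some] at hcnt; omega
    have hstep : pvMerge ((off, v) :: pvKept (off + 1) t) ((pvNones (off + 1) t).zip free)
        = v :: pvMerge (pvKept (off + 1) t) ((pvNones (off + 1) t).zip free) := by
      cases hG : (pvNones (off + 1) t).zip free with
      | nil => simp [pvMerge]
      | cons g gs =>
        have hg : off + 1 ≤ g.1 := by
          have hmem : g ∈ (pvNones (off + 1) t).zip free := by rw [hG]; exact List.mem_cons_self
          exact nones_ge t (off + 1) g.1 (List.of_mem_zip hmem).1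
        obtain ⟨q, f⟩ := g
        simp only [pvMerge]
        rw [if_pos (by simpa using by omega : off < q)]
    simp only [pvKept, pvNones, hstep, pvFillB]
    rw [merge_eq_fill t (off + 1) free hcnt']
  | none :: t, off, free, hcnt => by
    have hfree : ∃ f fs, free = f :: fs := by
      cases free with
      | nil => simp at hcnt
      | cons f fs => exact ⟨f, fs, rfl⟩
    obtain ⟨f, fs, rfl⟩ := hfree
    have hcnt' : t.countP (·.isNone) ≤ fs.length := by
      simp only [List.countP_cons, Option.isNone_none, if_true, List.length_cons] at hcnt; omega
    have hstep : pvMerge (pvKept (off + 1) t) ((off, f) :: (pvNones (off + 1) t).zip fs)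
        = f :: pvMerge (pvKept (off + 1) t) ((pvNones (off + 1) t).zip fs) := by
      cases hK : pvKept (off + 1) t with
      | nil => simp [pvMerge]
      | cons k ks =>
        have hk : off + 1 ≤ k.1 := by
          have hmem : k ∈ pvKept (off + 1) t := by rw [hK]; exact List.mem_cons_self
          exact kept_fst_ge t (off + 1) k hmem
        obtain ⟨p, v⟩ := k
        simp only [pvMerge]
        rw [if_neg (by simp at hk ⊢; omega : ¬ p < off)]
    simp only [pvKept, pvNones, List.zip_cons_cons, hstep, pvFillB]
    rw [merge_eq_fill t (off + 1) fs hcnt']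

-- ===== VERDICT (by name: the statement is the Claim_ definition above) =====
theorem correct_indexes_spec : Claim_equal_correct_indexes := by
  intro xs _hdom
  unfold Spec_correct_indexes correct_indexes correct_indexes_alt
  simp only []
  set n : Int := (xs.length : Int) with hn
  rw [foldA_eq_mark n xs PySem.Set.empty [], foldKept_eq_mark n xs 0 PySem.Set.empty []]
  simp only [List.nil_append]
  set M := pvMark n xs PySem.Set.empty with hM
  have hfilt : (PySem.List.pyRange 0 n 1).filter (fun i => decide (0 ≤ i) && !(M.2.contains i))
      = (PySem.List.pyRange 0 n 1).filter (fun i => !(M.2.contains i)) := by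
    refine List.filter_congr (fun i hi => ?_)
    obtain ⟨hi0, _⟩ := PySem.List.mem_pyRange_one.mp hi
    simp [hi0]
  have hcount : M.1.countP (·.isNone)
      ≤ ((PySem.List.pyRange 0 n 1).filter (fun i => !(M.2.contains i))).length := by
    rw [← hfilt]; exact final_count n xs hn
  have hA : pvFillA M.1 M.2 0
      = pvFillB M.1 ((PySem.List.pyRange 0 n 1).filter (fun i => !(M.2.contains i))) := by
    rw [← hfilt]
    exact fill_eq n M.1 M.2 0 le_rfl (mark_nodup n xs PySem.Set.empty List.nodup_nil)
      (by rw [hfilt]; exact hcount)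
  have hrange : (0 : Int) + (M.1.length : Int) = n := by
    rw [mark_len n xs PySem.Set.empty]; omega
  have hB : (PySem.List.pyRange 0 n 1).filter
        (fun p => !((PySem.Set.ofList ((pvKept 0 M.1).map Prod.fst)).contains p)) = pvNones 0 M.1 := by
    have := filter_taken M.1 0
    rw [hrange] at this
    exact this
  rw [hA, hB, merge_eq_fill M.1 0 _ hcount]
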